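-- pv_equiv track=rewrite | github.com/Scarletwtc/BioInformatics | Project_L9/L9/Lab9_1.py | fragments_from_cuts
-- ===== SOURCE A (Python) =====
-- from typing import List, Dict
--
-- def fragments_from_cuts(seq_length: int, cuts: List[int]) -> List[int]:
--     if not cuts:
--         return [seq_length]
--
--     cuts_sorted = sorted(cuts)
--     fragment_lengths = []
--
--     # from start to first cut
--     fragment_lengths.append(cuts_sorted[0] - 0)
--
--     # between internal cuts
--     for i in range(len(cuts_sorted) - 1):
--         fragment_lengths.append(cuts_sorted[i+1] - cuts_sorted[i])
--
--     # last cut to end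
--     fragment_lengths.append(seq_length - cuts_sorted[-1])
--
--     return fragment_lengths
-- ===== SOURCE B (Python) =====
-- def fragments_from_cuts(seq_length, cuts):
--     # Selection-based single loop: repeatedly extract the minimum remaining cut
--     # and emit its distance from the previous boundary; no sort, no padding.
--     remaining = list(cuts)
--     out = []
--     prev = 0
--     while remaining:
--         m = min(remaining)
--         remaining.remove(m)
--         out.append(m - prev)
--         prev = m
--     out.append(seq_length - prev)
--     return out
-- ===== Notes on version B (the rewrite author's own statement) =====
-- stated objective: alternative
-- what changed: Replaces sort-then-adjacent-differences with a selection loop that repeatedly extracts the minimum remaining cut and emits its distance from the previous boundary, maintaining a prev accumulator; no sorted list or index arithmetic exists.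
import Mathlib
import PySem

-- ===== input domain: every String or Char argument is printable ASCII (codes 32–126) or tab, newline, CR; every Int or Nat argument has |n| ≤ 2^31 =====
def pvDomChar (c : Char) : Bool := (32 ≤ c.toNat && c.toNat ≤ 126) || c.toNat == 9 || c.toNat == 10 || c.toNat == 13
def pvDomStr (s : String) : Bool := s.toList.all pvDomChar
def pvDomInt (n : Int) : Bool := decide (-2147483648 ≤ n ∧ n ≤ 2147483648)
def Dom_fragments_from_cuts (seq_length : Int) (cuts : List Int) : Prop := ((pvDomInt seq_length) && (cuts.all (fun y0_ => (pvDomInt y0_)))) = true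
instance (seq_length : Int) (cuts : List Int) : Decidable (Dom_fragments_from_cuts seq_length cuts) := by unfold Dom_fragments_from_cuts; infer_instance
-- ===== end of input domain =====

-- B replaces A's sort-then-adjacent-differences with a selection loop: repeatedly extract the
-- minimum remaining cut and emit its distance from the previous boundary (objective: alternative).

-- ===== PORT A =====
def fragments_from_cuts (seq_length : Int) (cuts : List Int) : List Int :=
  if cuts = [] then [seq_length]
  else
    let cuts_sorted := PySem.List.sorted cuts (fun x => x) false
    let fragment_lengths : List Int := []
    -- from start to first cut
    let fragment_lengths := fragment_lengths ++ [PySem.List.pyGetD cuts_sorted 0 0 - 0]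
    -- between internal cuts (all indices are in range here, so the getD default 0 is never used)
    let fragment_lengths := (PySem.List.pyRange 0 ((cuts_sorted.length : Int) - 1) 1).foldl
        (fun acc i => acc ++ [PySem.List.pyGetD cuts_sorted (i + 1) 0 - PySem.List.pyGetD cuts_sorted i 0])
        fragment_lengths
    -- last cut to end (cuts_sorted[-1])
    fragment_lengths ++ [seq_length - PySem.List.pyGetD cuts_sorted (-1) 0]

-- ===== PORT B =====
-- the while-loop of Source B: state = (remaining, prev, out); min(remaining) / remaining.remove(m)
def fragLoop (L : Int) (remaining : List Int) (prev : Int) (out : List Int) : List Int :=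
  match hm : PySem.List.min? remaining (fun x : Int => x) with
  | none => out ++ [L - prev]
  | some m => fragLoop L ((PySem.List.remove? remaining m).getD []) m (out ++ [m - prev])
termination_by remaining.length
decreasing_by
  have hmem : m ∈ remaining := PySem.List.min?_mem hm
  simp only [PySem.List.remove?_eq_some_erase _ _ hmem, Option.getD_some]
  have h1 := List.length_erase_of_mem hmem
  have h2 := List.length_pos_of_mem hmem
  omega

def fragments_from_cuts_alt (seq_length : Int) (cuts : List Int) : List Int :=
  fragLoop seq_length cuts 0 []

-- ===== PRECONDITION & SPEC =====
def Spec_fragments_from_cuts (seq_length : Int) (cuts : List Int) (out : List Int) : Prop := out = fragments_from_cuts_alt seq_length cuts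
instance (seq_length : Int) (cuts : List Int) (out : List Int) : Decidable (Spec_fragments_from_cuts seq_length cuts out) := by unfold Spec_fragments_from_cuts; infer_instance

-- ===== CLAIM (what is proved, stated in full; the proofs are below) =====
def Claim_equal_fragments_from_cuts : Prop := ∀ (seq_length : Int) (cuts : List Int), Dom_fragments_from_cuts seq_length cuts → Spec_fragments_from_cuts seq_length cuts (fragments_from_cuts seq_length cuts)

-- ===== LEMMAS AND PROOFS =====

-- the common abstraction: differences prev→x₁→x₂→…→L along a list of boundaries
def diffList (L prev : Int) : List Int → List Int
  | [] => [L - prev]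
  | a :: t => (a - prev) :: diffList L a t

-- B computes diffList over the sorted remaining cuts.
lemma fragLoop_eq (L : Int) : ∀ (xs : List Int) (prev : Int) (out : List Int),
    fragLoop L xs prev out = out ++ diffList L prev (PySem.List.sorted xs (fun x => x) false) := by
  intro xs
  induction xs using (measure List.length).wf.induction with
  | _ xs ih =>
  intro prev out
  rw [fragLoop.eq_def]
  cases hm : PySem.List.min? xs (fun x : Int => x) with
  | none =>
    have hnil : xs = [] := (PySem.List.min?_eq_none_iff _ _).mp hm
    subst hnil
    simp [PySem.List.sorted, diffList]
  | some m =>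
    have hmem : m ∈ xs := PySem.List.min?_mem hm
    have hne : PySem.List.sorted xs (fun x : Int => x) false ≠ [] := by
      intro h
      exact (List.ne_nil_of_mem hmem) ((PySem.List.sorted_eq_nil_iff _ _ _).mp h)
    obtain ⟨a, t, hs⟩ := List.exists_cons_of_ne_nil hne
    -- m = a : both are minimal elements of xs, and min?/head of sorted are both ≤ all of xs
    have ham : a ∈ xs := (PySem.List.mem_sorted _ _ _ _).mp (hs ▸ List.mem_cons_self)
    have h1 : m ≤ a := PySem.List.min?_isMin hm a ham
    have h2 : a ≤ m := PySem.List.key_head_sorted_le _ _ hs m hmem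
    have hma : m = a := le_antisymm h1 h2
    subst hma
    show fragLoop L ((PySem.List.remove? xs m).getD []) m (out ++ [m - prev])
        = out ++ diffList L prev (PySem.List.sorted xs (fun x => x) false)
    rw [PySem.List.remove?_eq_some_erase _ _ hmem]
    simp only [Option.getD_some]
    -- sorted (xs.erase m) = t
    have hperm : t.Perm (xs.erase m) := by
      have : (PySem.List.sorted xs (fun x : Int => x) false).Perm xs := PySem.List.sorted_perm xs _ false
      have h3 : ((PySem.List.sorted xs (fun x : Int => x) false).erase m).Perm (xs.erase m) :=
        this.erase m
      rw [hs] at h3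
      simpa using h3
    have hpw : t.Pairwise (fun a b : Int => a ≤ b) := by
      have := PySem.List.sorted_pairwise xs (fun x : Int => x) (κ := Int)
      rw [hs] at this
      exact (List.pairwise_cons.mp this).2
    have hsort : PySem.List.sorted (xs.erase m) (fun x : Int => x) false = t :=
      PySem.List.sorted_id_eq_of_perm_of_pairwise _ _ hperm hpw
    rw [ih (xs.erase m) (by
      have h1 := List.length_erase_of_mem hmem
      have h2 := List.length_pos_of_mem hmem
      simp only [WellFoundedRelation.rel, InvImage]
      omega), hsort, hs]
    simp [diffList]

lemma pyGetD_neg_one_last (a : Int) (rest : List Int) :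
    PySem.List.pyGetD (a :: rest) (-1) 0 = (a :: rest).getLast (by simp) := by
  simp only [PySem.List.pyGetD, PySem.List.pyGet?, PySem.List.pyIdx?, List.getLast_eq_getElem]
  norm_num
  exact rfl

-- A's index loop, seen as a map over List.range, computes the adjacent differences of xs.
lemma diffs_range (xs : List Int) :
    (List.range (xs.length - 1)).map (fun k => xs.getD (k + 1) 0 - xs.getD k 0)
      = List.zipWith (fun lo hi => hi - lo) xs xs.tail := by
  induction xs with
  | nil => simp
  | cons a rest ih =>
    cases rest with
    | nil => simp
    | cons b t =>
      simp only [List.length_cons, Nat.add_sub_cancel, List.tail_cons] at ih ⊢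
      rw [List.range_succ_eq_map]
      simp only [List.map_cons, List.map_map, List.zipWith_cons_cons]
      refine congrArg₂ _ (by simp) ?_
      rw [← ih]
      apply List.map_congr_left
      intro k _
      simp [Nat.succ_eq_add_one]

-- adjacent differences plus final pad equal diffList starting at the head
lemma zip_pad_eq_diffList (L : Int) : ∀ (rest : List Int) (a : Int),
    List.zipWith (fun lo hi => hi - lo) (a :: rest) rest ++ [L - (a :: rest).getLast (by simp)]
      = diffList L a rest := by
  intro rest
  induction rest with
  | nil => simp [diffList]
  | cons b t ih =>
    intro a
    simp only [List.zipWith_cons_cons, List.getLast_cons_cons, diffList, List.cons_append]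
    exact congrArg _ (ih b)

-- A's nonempty body equals diffList L 0 over the sorted cuts a :: rest.
lemma body_eq (L a : Int) (rest : List Int) :
    ((PySem.List.pyRange 0 (((a :: rest).length : Int) - 1) 1).foldl
        (fun acc i => acc ++ [PySem.List.pyGetD (a :: rest) (i + 1) 0 - PySem.List.pyGetD (a :: rest) i 0])
        (([] : List Int) ++ [PySem.List.pyGetD (a :: rest) 0 0 - 0]))
      ++ [L - PySem.List.pyGetD (a :: rest) (-1) 0]
    = diffList L 0 (a :: rest) := by
  rw [PySem.List.foldl_append_singleton_eq_map, PySem.List.pyRange_one, List.map_map]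
  rw [pyGetD_neg_one_last]
  have hmap : (List.range ((((a :: rest).length : Int) - 1 - 0).toNat)).map
      ((fun i : Int => PySem.List.pyGetD (a :: rest) (i + 1) 0 - PySem.List.pyGetD (a :: rest) i 0) ∘ (fun k : Nat => (0 : Int) + (k : Int)))
      = List.zipWith (fun lo hi => hi - lo) (a :: rest) rest := by
    have hlen : ((((a :: rest).length : Int) - 1 - 0).toNat) = (a :: rest).length - 1 := by
      simp [List.length_cons]
    have hd := diffs_range (a :: rest)
    simp only [List.tail_cons] at hd
    rw [hlen, ← hd]
    apply List.map_congr_left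
    intro k _
    simp only [Function.comp_apply, Int.zero_add]
    rw [show ((k : Int) + 1) = ((k + 1 : Nat) : Int) from by push_cast; ring]
    rw [PySem.List.pyGetD_natCast, PySem.List.pyGetD_natCast]
  rw [hmap]
  have h0 : PySem.List.pyGetD (a :: rest) 0 0 = a := by
    simp [PySem.List.pyGetD, PySem.List.pyGet?, PySem.List.pyIdx?]
  rw [h0]
  have := zip_pad_eq_diffList L rest a
  simp only [diffList]
  rw [← this]
  simp

-- ===== VERDICT (by name: the statement is the Claim_ definition above) =====
theorem fragments_from_cuts_spec : Claim_equal_fragments_from_cuts := by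
  intro seq_length cuts _
  show fragments_from_cuts seq_length cuts = fragments_from_cuts_alt seq_length cuts
  unfold fragments_from_cuts fragments_from_cuts_alt
  rw [fragLoop_eq]
  by_cases h : cuts = []
  · subst h
    simp [PySem.List.sorted, diffList]
  · rw [if_neg h]
    have hs : PySem.List.sorted cuts (fun x => x) false ≠ ([] : List Int) := by
      intro he
      exact h ((PySem.List.sorted_eq_nil_iff _ _ _).mp he)
    obtain ⟨a, rest, he⟩ := List.exists_cons_of_ne_nil hs
    simp only [he, List.nil_append]
    exact body_eq seq_length a rest
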